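-- pv_equiv track=rewrite | github.com/Grachya/python-animals | data_format/top_ten_words_json.py | get_words_dict
-- ===== SOURCE A (Python) =====
-- def get_words_dict(items):
--     words_dict = {}
--     for item in items:
--         splited_words = item['description'].split()
--         for word in splited_words:
--             word = word.lower()
--             if word.isdigit() or len(word) <= 6:
--                 continue
--             if words_dict.get(word):
--                 words_dict[word] += 1
--             else:
--                 words_dict[word] = 1
--     return words_dict
-- ===== SOURCE B (Python) =====
-- def get_words_dict(items):
--     # Collect the qualifying words first, then build the dict by counting
--     # each distinct word (first-occurrence order) in the flat list.
--     words = []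
--     for item in items:
--         for word in item['description'].split():
--             word = word.lower()
--             if not word.isdigit() and len(word) > 6:
--                 words.append(word)
--     return {word: words.count(word) for word in dict.fromkeys(words)}
-- ===== Notes on version B (the rewrite author's own statement) =====
-- stated objective: alternative
-- what changed: Instead of incrementing per-word counts in a dict during the scan, B first collects the flat list of qualifying lowercased words and then builds the dict in one comprehension, mapping each distinct word (first-occurrence order via dict.fromkeys) to its count in that list.
import Mathlib
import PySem

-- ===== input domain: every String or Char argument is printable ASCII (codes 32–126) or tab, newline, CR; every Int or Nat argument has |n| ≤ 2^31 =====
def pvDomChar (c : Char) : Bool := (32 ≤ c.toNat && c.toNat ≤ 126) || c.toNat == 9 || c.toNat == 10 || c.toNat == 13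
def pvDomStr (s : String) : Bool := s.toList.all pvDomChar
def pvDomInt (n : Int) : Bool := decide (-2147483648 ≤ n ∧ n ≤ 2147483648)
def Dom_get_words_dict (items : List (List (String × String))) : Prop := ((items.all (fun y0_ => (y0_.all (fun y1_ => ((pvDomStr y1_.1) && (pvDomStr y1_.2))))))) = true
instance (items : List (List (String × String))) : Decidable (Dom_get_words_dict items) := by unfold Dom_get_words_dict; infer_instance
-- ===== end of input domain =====

-- B collects the qualifying (lowercased, non-digit, length>6) words into one flat list,
-- then builds the dict by counting each distinct word (first-occurrence order); same value as A.


-- ===== PORT A =====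
def get_words_dict (items : List (List (String × String))) : List (String × Int) :=
  (items.foldl (fun words_dict item =>
    (PySem.Str.split₀ (((PySem.Dict.mk item).get? "description").getD "")).foldl
      (fun d w =>
        let word := PySem.Str.lower w
        if PySem.Str.strIsdigit word = true ∨ PySem.Str.len word ≤ 6 then d
        else
          match d.get? word with
          | some v => if v ≠ 0 then d.insert word (v + 1) else d.insert word 1
          | none => d.insert word 1) words_dict)
    (PySem.Dict.empty : PySem.Dict String Int)).items

-- ===== PORT B =====
def get_words_dict_alt (items : List (List (String × String))) : List (String × Int) :=
  let words := items.foldl (fun acc item =>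
    (PySem.Str.split₀ (((PySem.Dict.mk item).get? "description").getD "")).foldl
      (fun ws w =>
        let word := PySem.Str.lower w
        if ¬ PySem.Str.strIsdigit word = true ∧ 6 < PySem.Str.len word then ws ++ [word] else ws)
      acc) []
  (PySem.List.dedup words).map (fun w => (w, (words.count w : Int)))

-- ===== PRECONDITION & SPEC =====
-- Pre_ excludes exactly the items missing a "description" key, on which Python's item['description'] raises KeyError.
def Pre_get_words_dict (items : List (List (String × String))) : Prop :=
  ∀ item ∈ items, ((PySem.Dict.mk item).get? "description").isSome = true
instance (items : List (List (String × String))) : Decidable (Pre_get_words_dict items) := by unfold Pre_get_words_dict; infer_instance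

def pvWitness_get_words_dict : (List (List (String × String))) :=
  [[("description", "Amazing striped Animals 1234567 amazing")], [("description", "short"), ("id", "7")]]

def Spec_get_words_dict (items : List (List (String × String))) (out : List (String × Int)) : Prop := out = get_words_dict_alt items
instance (items : List (List (String × String))) (out : List (String × Int)) : Decidable (Spec_get_words_dict items out) := by unfold Spec_get_words_dict; infer_instance

-- ===== CLAIM (what is proved, stated in full; the proofs are below) =====
def Claim_equal_get_words_dict : Prop := ∀ (items : List (List (String × String))), Dom_get_words_dict items → Pre_get_words_dict items → Spec_get_words_dict items (get_words_dict items)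

-- ===== LEMMAS AND PROOFS =====

-- the qualifying lowercased words of one item
def pvWords (item : List (String × String)) : List String :=
  (((PySem.Str.split₀ (((PySem.Dict.mk item).get? "description").getD "")).map PySem.Str.lower).filter
    (fun word => decide (¬ PySem.Str.strIsdigit word = true ∧ 6 < PySem.Str.len word)))

-- B's word-collecting loop builds the flat list of qualifying words
theorem alt_inner_eq (item : List (String × String)) (acc' : List String) :
    (PySem.Str.split₀ (((PySem.Dict.mk item).get? "description").getD "")).foldl
      (fun ws w =>
        let word := PySem.Str.lower w
        if ¬ PySem.Str.strIsdigit word = true ∧ 6 < PySem.Str.len word then ws ++ [word] else ws)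
      acc' = acc' ++ pvWords item := by
  show (PySem.Str.split₀ (((PySem.Dict.mk item).get? "description").getD "")).foldl
      (fun ws w =>
        if ¬ PySem.Str.strIsdigit (PySem.Str.lower w) = true ∧ 6 < PySem.Str.len (PySem.Str.lower w)
        then ws ++ [PySem.Str.lower w] else ws) acc' = acc' ++ pvWords item
  rw [pvWords, ← List.foldl_map (f := PySem.Str.lower)
    (g := fun ws word => if ¬ PySem.Str.strIsdigit word = true ∧ 6 < PySem.Str.len word then ws ++ [word] else ws)]
  exact PySem.List.foldl_append_ite_eq_filter
    (fun word => ¬ PySem.Str.strIsdigit word = true ∧ 6 < PySem.Str.len word) _ _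

theorem alt_words_eq (items : List (List (String × String))) (acc : List String) :
    items.foldl (fun acc item =>
      (PySem.Str.split₀ (((PySem.Dict.mk item).get? "description").getD "")).foldl
        (fun ws w =>
          let word := PySem.Str.lower w
          if ¬ PySem.Str.strIsdigit word = true ∧ 6 < PySem.Str.len word then ws ++ [word] else ws)
        acc) acc = acc ++ items.flatMap pvWords := by
  have h1 := PySem.List.foldl_congr_mem (l := items) (init := acc)
    (f := fun acc item =>
      (PySem.Str.split₀ (((PySem.Dict.mk item).get? "description").getD "")).foldl
        (fun ws w =>
          let word := PySem.Str.lower w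
          if ¬ PySem.Str.strIsdigit word = true ∧ 6 < PySem.Str.len word then ws ++ [word] else ws)
        acc)
    (g := fun acc' item => acc' ++ pvWords item)
    (fun acc' item _ => alt_inner_eq item acc')
  exact h1.trans (PySem.List.foldl_append_eq_flatMap _ _ _)

-- A's per-word update is the counter update
theorem step_eq (d : PySem.Dict String Int) (word : String) :
    (match d.get? word with
     | some v => if v ≠ 0 then d.insert word (v + 1) else d.insert word 1
     | none => d.insert word 1) = d.insert word (d.getD word 0 + 1) := by
  rcases h : d.get? word with _ | v <;> simp [PySem.Dict.getD, h]
  by_cases hv : v = 0 <;> simp [hv]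

-- A's inner loop over one item's words, as a fold over pvWords
theorem a_inner_eq (item : List (String × String)) (d : PySem.Dict String Int) :
    (PySem.Str.split₀ (((PySem.Dict.mk item).get? "description").getD "")).foldl
      (fun d w =>
        let word := PySem.Str.lower w
        if PySem.Str.strIsdigit word = true ∨ PySem.Str.len word ≤ 6 then d
        else
          match d.get? word with
          | some v => if v ≠ 0 then d.insert word (v + 1) else d.insert word 1
          | none => d.insert word 1) d
    = (pvWords item).foldl (fun d word => d.insert word (d.getD word 0 + 1)) d := by
  have hfilter := PySem.List.foldl_ite_eq_foldl_filter
      (p := fun word => ¬ PySem.Str.strIsdigit word = true ∧ 6 < PySem.Str.len word)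
      (f := fun d word => d.insert word (d.getD word 0 + 1))
      (l := (PySem.Str.split₀ (((PySem.Dict.mk item).get? "description").getD "")).map PySem.Str.lower)
      (init := d)
  rw [pvWords, ← hfilter, List.foldl_map]
  apply PySem.List.foldl_congr_mem
  intro acc x _
  simp only
  by_cases hb : PySem.Str.strIsdigit (PySem.Str.lower x) = true ∨ PySem.Str.len (PySem.Str.lower x) ≤ 6
  · rw [if_pos hb, if_neg (by rintro ⟨hnd, hlen⟩; rcases hb with h | h; exact hnd h; omega)]
  · rw [not_or] at hb
    rw [if_neg (by rintro (h | h); exact hb.1 h; exact hb.2 h),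
      if_pos ⟨hb.1, by have := hb.2; omega⟩, step_eq]

theorem a_eq_counter_items (items : List (List (String × String))) :
    get_words_dict items = (PySem.Dict.counter (items.flatMap pvWords)).items := by
  rw [get_words_dict, ← PySem.Dict.foldl_insert_getD_add_one_eq_counter]
  congr 1
  rw [List.foldl_flatMap]
  exact PySem.List.foldl_congr_mem (l := items) (init := (PySem.Dict.empty : PySem.Dict String Int))
    (f := fun (words_dict : PySem.Dict String Int) item =>
      (PySem.Str.split₀ (((PySem.Dict.mk item).get? "description").getD "")).foldl
        (fun d w =>
          let word := PySem.Str.lower w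
          if PySem.Str.strIsdigit word = true ∨ PySem.Str.len word ≤ 6 then d
          else
            match d.get? word with
            | some v => if v ≠ 0 then d.insert word (v + 1) else d.insert word 1
            | none => d.insert word 1) words_dict)
    (g := fun acc x => (pvWords x).foldl (fun d word => d.insert word (d.getD word 0 + 1)) acc)
    (fun d item _ => a_inner_eq item d)

-- ===== VERDICT (by name: the statement is the Claim_ definition above) =====
theorem get_words_dict_spec : Claim_equal_get_words_dict := by
  intro items _ _
  show get_words_dict items = get_words_dict_alt items
  rw [a_eq_counter_items, get_words_dict_alt]
  simp only [alt_words_eq items [], List.nil_append]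
  rw [PySem.Dict.items_counter, PySem.List.dedup_eq_ofList]
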